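-- pv_equiv track=rewrite | github.com/weilunn97/Amazon-OA-2020 | longest_vowel_string.py | longest_vowel_string
-- ===== SOURCE A (Python) =====
-- from collections import deque
--
-- def longest_vowel_string(s: str) -> int:
--     """
--     Time  : O()
--     Space : O(), where N = len(s)
--     """
--     # LET DP[I] = LONGEST VOWEL STRING ENDING AT S[I], INCLUSIVE
--     vowels = set("aeiou")
--     dp = deque([0] * len(s))
--     dp[0] = int(s[0] in vowels)
--
--     for i in range(1, len(dp)):
--         dp[i] = 0 if s[i] not in vowels else dp[i - 1] + 1
--
--     # ADD ANY STARTING AND ENDING VOWEL STRINGS TO OUR COUNT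
--     start, end = 0, 0
--     while dp and dp[0] > 0: start = dp.popleft()
--     while dp and dp[-1] > 0: end = max(end, dp.pop())
--
--     # FIND THE LONGEST STRING IN THE MIDDLE
--     count = max(dp) if dp else 0
--     return start + count + end
-- ===== SOURCE B (Python) =====
-- def longest_vowel_string(s: str) -> int:
--     # one pass over the characters: track the leading run, the best completed
--     # middle run, and the current run; no dp array, no deque popping
--     vowels = "aeiou"
--     lead = -1          # length of the leading vowel run; -1 while still inside it
--     best = 0           # longest completed vowel run that is not the leading run
--     cur = 0            # length of the current (open) vowel run
--     for c in s:
--         if c in vowels: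
--             cur += 1
--         else:
--             if lead == -1:
--                 lead = cur
--             else:
--                 best = max(best, cur)
--             cur = 0
--     if lead == -1:     # the whole string is vowels
--         return cur
--     return lead + best + cur
-- ===== Notes on version B (the rewrite author's own statement) =====
-- stated objective: simpler
-- what changed: Replaces A's dp-over-a-deque pipeline (build dp[i]=vowel-run length ending at i, pop the leading run from the left, pop the trailing run from the right, then max over the rest) by a single left fold tracking three integers: leading run length, best completed middle run, and the current open run.
-- crash fix: On the empty string A raises IndexError (it indexes s[0]/dp[0]); B naturally returns 0. — e.g. on longest_vowel_string(""): A raises IndexError, B returns 0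
import Mathlib
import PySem

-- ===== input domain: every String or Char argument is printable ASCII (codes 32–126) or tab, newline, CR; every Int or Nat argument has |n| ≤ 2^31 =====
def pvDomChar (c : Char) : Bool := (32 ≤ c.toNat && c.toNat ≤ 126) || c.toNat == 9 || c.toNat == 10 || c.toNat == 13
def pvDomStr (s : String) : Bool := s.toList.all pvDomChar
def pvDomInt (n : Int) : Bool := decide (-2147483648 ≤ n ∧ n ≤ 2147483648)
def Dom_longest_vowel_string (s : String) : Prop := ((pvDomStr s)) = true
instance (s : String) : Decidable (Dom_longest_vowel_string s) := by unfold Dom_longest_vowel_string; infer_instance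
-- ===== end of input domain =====

-- B replaces A's dp-deque + two popping loops by one three-counter left fold (simpler; a timing run measured it faster, A's deque indexing being linear per step).
-- A raises IndexError on the empty string (s[0]); that input is excluded by Pre_ and B returns 0 there (Raises_ block).

-- ===== PORT A =====
-- vowels = set("aeiou")
def pvVowelsA : PySem.Set Char := PySem.Set.ofList "aeiou".toList

-- while dp and dp[0] > 0: start = dp.popleft()
def dqPopLeft : List Int → Int → List Int × Int
  | [], st => ([], st)
  | d :: rest, st => if d > 0 then dqPopLeft rest d else (d :: rest, st)

-- while dp and dp[-1] > 0: end = max(end, dp.pop())   (runs on the REVERSED deque)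
def dqPopRight : List Int → Int → List Int × Int
  | [], e => ([], e)
  | d :: rest, e => if d > 0 then dqPopRight rest (max e d) else (d :: rest, e)

-- loop body of `for i in range(1, len(dp))`; the indices i and i-1 the loop visits are in range,
-- so List.getD/List.set are exact for Python's dp[i]/s[i]/dp[i-1] here
def aDpStep (cs : List Char) (d : List Int) (i : Int) : List Int :=
  d.set i.toNat (if pvVowelsA.contains (cs.getD i.toNat ' ') = false then 0
                 else d.getD (i.toNat - 1) 0 + 1)

def longest_vowel_string (s : String) : Int :=
  let cs := s.toList
  -- dp = deque([0]*len(s)); dp[0] = int(s[0] in vowels)   (s[0] raises IndexError on "", excluded by Pre_)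
  let dp0 := (List.replicate cs.length (0 : Int)).set 0
      (if pvVowelsA.contains (cs.getD 0 ' ') then 1 else 0)
  let dp1 := (PySem.List.pyRange 1 (cs.length : Int) 1).foldl (aDpStep cs) dp0
  let p1 := dqPopLeft dp1 0
  let p2 := dqPopRight p1.1.reverse 0
  -- count = max(dp) if dp else 0
  let count := match PySem.List.max? p2.1.reverse (fun x => x) with
    | some m => m
    | none => 0
  p1.2 + count + p2.2

-- ===== PORT B =====
-- loop body of B's single scan: state (lead, best, cur)
def bStep (acc : Int × Int × Int) (c : Char) : Int × Int × Int :=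
  if ("aeiou".toList).contains c then (acc.1, acc.2.1, acc.2.2 + 1)
  else if acc.1 = -1 then (acc.2.2, acc.2.1, 0)
  else (acc.1, max acc.2.1 acc.2.2, 0)

def longest_vowel_string_alt (s : String) : Int :=
  let st := s.toList.foldl bStep (-1, 0, 0)
  if st.1 = -1 then st.2.2 else st.1 + st.2.1 + st.2.2

-- ===== PRECONDITION & SPEC =====
-- Pre_ excludes only the empty string, on which A raises IndexError (s[0]).
def Pre_longest_vowel_string (s : String) : Prop := s ≠ ""
instance (s : String) : Decidable (Pre_longest_vowel_string s) := by
  unfold Pre_longest_vowel_string; infer_instance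
def pvWitness_longest_vowel_string : String := "ba"

-- On the empty string A raises IndexError (it indexes s[0]/dp[0]); B naturally returns 0.
def Raises_longest_vowel_string (s : String) : Prop := s = ""
instance (s : String) : Decidable (Raises_longest_vowel_string s) := by
  unfold Raises_longest_vowel_string; infer_instance
def pvRaiseWitness_longest_vowel_string : String := ""
def pvRaiseWitnessOut_longest_vowel_string : Int := 0

def Spec_longest_vowel_string (s : String) (out : Int) : Prop := out = longest_vowel_string_alt s
instance (s : String) (out : Int) : Decidable (Spec_longest_vowel_string s out) := by
  unfold Spec_longest_vowel_string; infer_instance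

-- ===== CLAIM (what is proved, stated in full; the proofs are below) =====
def Claim_equal_longest_vowel_string : Prop := ∀ (s : String), Dom_longest_vowel_string s → Pre_longest_vowel_string s → Spec_longest_vowel_string s (longest_vowel_string s)
def Claim_raises_longest_vowel_string : Prop := (∀ (s : String), Dom_longest_vowel_string s → Raises_longest_vowel_string s → ¬ Pre_longest_vowel_string s) ∧ (Dom_longest_vowel_string (pvRaiseWitness_longest_vowel_string) ∧ Raises_longest_vowel_string (pvRaiseWitness_longest_vowel_string) ∧ longest_vowel_string_alt (pvRaiseWitness_longest_vowel_string) = pvRaiseWitnessOut_longest_vowel_string)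

-- ===== LEMMAS AND PROOFS =====

-- the vowel test both ports perform
def vw (c : Char) : Bool := ("aeiou".toList).contains c

lemma pvVowelsA_eq : pvVowelsA = "aeiou".toList := by decide

-- dp values of A: run length ending at each position, from carry p
def dpC (p : Int) : List Char → List Int
  | [] => []
  | c :: r => (if vw c then p + 1 else 0) :: dpC (if vw c then p + 1 else 0) r

-- the carry after a block
def carryC (p : Int) : List Char → Int
  | [] => p
  | c :: r => carryC (if vw c then p + 1 else 0) r

-- best completed vowel run, starting from an open run of length cur
def Pm (cur : Int) : List Char → Int
  | [] => 0
  | c :: r => if vw c then Pm (cur + 1) r else max cur (Pm 0 r)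

-- [off+1, off+2, …, off+m]
def rampF (off : Int) : Nat → List Int
  | 0 => []
  | m + 1 => (off + 1) :: rampF (off + 1) m

def max0 (l : List Int) : Int := l.foldl max 0

-- w with its trailing vowel run removed
def chop (w : List Char) : List Char := (w.reverse.dropWhile vw).reverse


-- ---- basic facts about the helper functions ----

lemma bStep_contains (c : Char) (acc : Int × Int × Int) :
    bStep acc c = if vw c then (acc.1, acc.2.1, acc.2.2 + 1)
      else if acc.1 = -1 then (acc.2.2, acc.2.1, 0) else (acc.1, max acc.2.1 acc.2.2, 0) := rfl

lemma length_dpC (p : Int) (w : List Char) : (dpC p w).length = w.length := by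
  induction w generalizing p with
  | nil => rfl
  | cons c r ih => simp [dpC, ih]

lemma carryC_append (x y : List Char) (p : Int) :
    carryC p (x ++ y) = carryC (carryC p x) y := by
  induction x generalizing p with
  | nil => rfl
  | cons c r ih => simp [carryC, ih]

lemma dpC_append (x y : List Char) (p : Int) :
    dpC p (x ++ y) = dpC p x ++ dpC (carryC p x) y := by
  induction x generalizing p with
  | nil => rfl
  | cons c r ih => simp [dpC, carryC, ih]

lemma dpC_vowels (w : List Char) (hw : ∀ c ∈ w, vw c = true) (p : Int) :
    dpC p w = rampF p w.length := by
  induction w generalizing p with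
  | nil => rfl
  | cons c r ih =>
    have hc : vw c = true := hw c (by simp)
    have := ih (fun d hd => hw d (by simp [hd])) (p + 1)
    simp [dpC, hc, rampF, this]

lemma carryC_vowels (w : List Char) (hw : ∀ c ∈ w, vw c = true) (p : Int) :
    carryC p w = p + w.length := by
  induction w generalizing p with
  | nil => simp [carryC]
  | cons c r ih =>
    have hc : vw c = true := hw c (by simp)
    have := ih (fun d hd => hw d (by simp [hd])) (p + 1)
    simp only [carryC, hc, if_true, this, List.length_cons]
    push_cast; ring

lemma dpC_nonneg (w : List Char) (p : Int) (hp : 0 ≤ p) : ∀ x ∈ dpC p w, 0 ≤ x := by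
  induction w generalizing p with
  | nil => simp [dpC]
  | cons c r ih =>
    intro x hx
    simp only [dpC, List.mem_cons] at hx
    rcases hx with h | h
    · subst h; split <;> omega
    · exact ih _ (by split <;> omega) x h

lemma getD_dpC_last (w : List Char) (hw : w ≠ []) (p : Int) :
    (dpC p w).getD (w.length - 1) 0 = carryC p w := by
  induction w generalizing p with
  | nil => exact absurd rfl hw
  | cons c r ih =>
    rcases r with _ | ⟨d, r'⟩
    · simp [dpC, carryC]
    · have := ih (by simp) (if vw c then p + 1 else 0)
      simpa [dpC, carryC, List.getD_cons_succ] using this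

lemma getLastD_dpC (w : List Char) (hw : w ≠ []) (p : Int) :
    (dpC p w).getLastD 0 = carryC p w := by
  induction w generalizing p with
  | nil => exact absurd rfl hw
  | cons c r ih =>
    rcases r with _ | ⟨d, r'⟩
    · simp [dpC, carryC]
    · have := ih (by simp) (if vw c then p + 1 else 0)
      simpa [dpC, carryC] using this

lemma rampF_snoc (m : Nat) (off : Int) :
    rampF off (m + 1) = rampF off m ++ [off + (m + 1)] := by
  induction m generalizing off with
  | zero => simp [rampF]
  | succ k ih =>
    rw [rampF, ih (off + 1), rampF]
    simp; ring

-- ---- the two deque-popping loops on a ramp followed by a nonpositive head ----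

lemma dqPopLeft_ramp (m : Nat) : ∀ (p : Int), 0 ≤ p → ∀ z : List Int, z.headD 0 ≤ 0 →
    dqPopLeft (rampF p m ++ z) p = (z, p + m) := by
  induction m with
  | zero =>
    intro p hp z hz
    rcases z with _ | ⟨d, z'⟩
    · simp [rampF, dqPopLeft]
    · simp only [List.headD_cons] at hz
      have hd' : ¬ d > 0 := by omega
      simp [rampF, dqPopLeft, hd']
  | succ k ih =>
    intro p hp z hz
    rw [rampF]
    simp only [List.cons_append, dqPopLeft, if_pos (by omega : p + 1 > 0)]
    rw [ih (p + 1) (by omega) z hz]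
    congr 1; push_cast; ring

lemma dqPopRight_ramp (m : Nat) : ∀ (e : Int), 0 ≤ e → ∀ z : List Int, z.headD 0 ≤ 0 →
    dqPopRight ((rampF 0 m).reverse ++ z) e = (z, max e m) := by
  induction m with
  | zero =>
    intro e he z hz
    have hm : max e ((0:Nat):Int) = e := by simp; omega
    rcases z with _ | ⟨d, z'⟩
    · simp only [rampF, List.reverse_nil, List.nil_append, dqPopRight]
      rw [hm]
    · simp only [List.headD_cons] at hz
      have hd' : ¬ d > 0 := by omega
      simp only [rampF, List.reverse_nil, List.nil_append, dqPopRight, if_neg hd']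
      rw [hm]
  | succ k ih =>
    intro e he z hz
    rw [rampF_snoc]
    simp only [List.reverse_append, List.reverse_cons, List.reverse_nil, List.nil_append,
      List.cons_append, zero_add]
    rw [dqPopRight, if_pos (by positivity : ((k:Int) + 1) > 0)]
    rw [ih (max e ((k:Int) + 1)) (by positivity) z hz]
    congr 1
    push_cast
    rw [max_assoc, max_eq_left (by omega : (k:Int) ≤ (k:Int) + 1)]

-- ---- max0 ----

lemma foldl_max_shift (l : List Int) : ∀ a b : Int, l.foldl max (max a b) = max a (l.foldl max b) := by
  induction l with
  | nil => intro a b; rfl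
  | cons x t ih =>
    intro a b
    simp only [List.foldl_cons, max_assoc]
    exact ih a (max b x)

lemma max0_nonneg (l : List Int) : 0 ≤ max0 l := by
  have := foldl_max_shift l 0 0
  simp only [max0]
  simp only [max_self] at this
  rw [this]; exact le_max_left _ _

lemma max0_append (a b : List Int) : max0 (a ++ b) = max (max0 a) (max0 b) := by
  have h := foldl_max_shift b (a.foldl max 0) 0
  rw [max_eq_left (show (0:Int) ≤ a.foldl max 0 from max0_nonneg a)] at h
  simp only [max0, List.foldl_append]
  exact h

lemma max0_cons_zero (l : List Int) : max0 (0 :: l) = max0 l := by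
  simp [max0]

lemma foldl_max_rampF (m : Nat) : ∀ off : Int, (rampF off m).foldl max off = off + m := by
  induction m with
  | zero => intro off; simp [rampF]
  | succ k ih =>
    intro off
    simp only [rampF, List.foldl_cons, max_eq_right (by omega : off ≤ off + 1)]
    rw [ih (off + 1)]; push_cast; ring

lemma max0_rampF (m : Nat) : max0 (rampF 0 m) = m := by
  simpa [max0] using foldl_max_rampF m 0

lemma count_eq (l : List Int) (hl : ∀ x ∈ l, 0 ≤ x) :
    (match PySem.List.max? l (fun x => x) with | some m => m | none => 0) = max0 l := by
  rcases l with _ | ⟨x, t⟩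
  · rfl
  · rw [PySem.List.max?_id_cons]
    simp only [max0, List.foldl_cons]
    rw [max_eq_right (hl x (by simp))]

-- ---- chop and the trailing run ----

lemma chop_vowels (w : List Char) (hw : ∀ c ∈ w, vw c = true) : chop w = [] := by
  simp only [chop, List.reverse_eq_nil_iff, List.dropWhile_eq_nil_iff]
  intro x hx; exact hw x (by simpa using hx)

lemma chop_append_cons (x : List Char) (d : Char) (r : List Char) (hd : vw d = false) :
    chop (x ++ d :: r) = x ++ d :: chop r := by
  simp only [chop, List.reverse_append, List.reverse_cons]
  rw [List.append_assoc, List.singleton_append, List.dropWhile_append]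
  split
  · next h =>
    simp only [List.isEmpty_iff] at h
    rw [List.dropWhile_cons_of_neg (by simp [hd]), h]
    simp
  · next h =>
    simp only [List.isEmpty_iff] at h
    simp

lemma tails_decomp (w : List Char) :
    w = chop w ++ (w.reverse.takeWhile vw).reverse := by
  conv_rhs => rw [chop, ← List.reverse_append, List.takeWhile_append_dropWhile,
    List.reverse_reverse]

lemma tails_vowels (w : List Char) : ∀ c ∈ (w.reverse.takeWhile vw).reverse, vw c = true := by
  intro c hc; exact List.mem_takeWhile_imp (by simpa using hc)

lemma carryC_chop (w : List Char) : carryC 0 (chop w) = 0 := by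
  rcases hdw : w.reverse.dropWhile vw with _ | ⟨y, ys⟩
  · simp [chop, hdw, carryC]
  · have hy : vw y = false := by
      have := List.head_dropWhile_not vw (l := w.reverse) (by simp [hdw])
      simpa [hdw] using this
    simp only [chop, hdw, List.reverse_cons]
    rw [carryC_append]
    simp [carryC, hy]

lemma carryC_tail_len (w : List Char) :
    carryC 0 w = ((w.reverse.takeWhile vw).length : Int) := by
  conv_lhs => rw [tails_decomp w]
  rw [carryC_append, carryC_chop, carryC_vowels _ (tails_vowels w)]
  simp

-- ---- Pm ----

lemma Pm_nonneg (w : List Char) : ∀ cur : Int, 0 ≤ cur → 0 ≤ Pm cur w := by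
  induction w with
  | nil => intro cur _; simp [Pm]
  | cons c r ih =>
    intro cur hc
    rw [Pm]
    split
    · exact ih (cur + 1) (by omega)
    · exact le_trans (le_trans hc (le_max_left cur (Pm 0 r))) le_rfl

lemma Pm_vowels_prefix (V : List Char) (hV : ∀ c ∈ V, vw c = true) :
    ∀ (cur : Int) (x : List Char), Pm cur (V ++ x) = Pm (cur + V.length) x := by
  induction V with
  | nil => intro cur x; simp
  | cons c r ih =>
    intro cur x
    have hc : vw c = true := hV c (by simp)
    rw [List.cons_append, Pm, if_pos hc, ih (fun d hd => hV d (by simp [hd])) (cur + 1)]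
    congr 1
    simp only [List.length_cons, Nat.cast_add, Nat.cast_one]; ring

lemma Pm_eq_aux : ∀ (n : Nat) (w : List Char), w.length ≤ n →
    Pm 0 w = max0 (dpC 0 (chop w)) := by
  intro n
  induction n with
  | zero =>
    intro w hw
    have : w = [] := List.eq_nil_of_length_eq_zero (by omega)
    subst this
    simp [Pm, chop, dpC, max0]
  | succ k ih =>
    intro w hw
    have hsplit : w = w.takeWhile vw ++ w.dropWhile vw :=
      (List.takeWhile_append_dropWhile).symm
    rcases hdw : w.dropWhile vw with _ | ⟨d, r⟩
    · -- all vowels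
      have hv : ∀ c ∈ w, vw c = true := by
        intro c hc
        apply List.mem_takeWhile_imp (p := vw)
        rw [hsplit, hdw] at hc; simpa using hc
      rw [chop_vowels w hv]
      have h0 : Pm 0 w = 0 := by
        have := Pm_vowels_prefix w hv 0 []
        simpa using this
      simp [h0, dpC, max0]
    · have hd : vw d = false := by
        have := List.head_dropWhile_not vw (l := w) (by simp [hdw])
        simpa [hdw] using this
      have hVv : ∀ c ∈ w.takeWhile vw, vw c = true := fun c hc => List.mem_takeWhile_imp hc
      have hr : r.length ≤ k := by
        have h1 : (w.takeWhile vw).length + (d :: r).length = w.length := by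
          rw [← List.length_append, ← hdw, ← hsplit]
        simp only [List.length_cons] at h1
        omega
      have hchop : chop w = w.takeWhile vw ++ d :: chop r := by
        conv_lhs => rw [hsplit, hdw]
        exact chop_append_cons _ d r hd
      rw [hchop, dpC_append, dpC_vowels _ hVv, carryC_vowels _ hVv]
      have hdc : dpC (0 + ((w.takeWhile vw).length : Int)) (d :: chop r)
          = 0 :: dpC 0 (chop r) := by
        simp [dpC, hd]
      rw [hdc, max0_append, max0_cons_zero, max0_rampF]
      conv_lhs => rw [hsplit, hdw]
      rw [Pm_vowels_prefix _ hVv 0 (d :: r), Pm, if_neg (by simp [hd]), ← ih r hr]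
      have : (0 : Int) + ((w.takeWhile vw).length : Int) = ((w.takeWhile vw).length : Int) := by ring
      rw [this]

lemma Pm_eq (w : List Char) : Pm 0 w = max0 (dpC 0 (chop w)) :=
  Pm_eq_aux w.length w le_rfl

-- ---- B's fold ----

lemma foldB_vowels (w : List Char) (hw : ∀ c ∈ w, vw c = true) :
    ∀ (b cur : Int), w.foldl bStep (-1, b, cur) = (-1, b, cur + w.length) := by
  induction w with
  | nil => intro b cur; simp
  | cons c r ih =>
    intro b cur
    have hc : vw c = true := hw c (by simp)
    rw [List.foldl_cons, bStep_contains, if_pos hc]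
    rw [ih (fun d hd => hw d (by simp [hd])) b (cur + 1)]
    simp only [List.length_cons, Nat.cast_add, Nat.cast_one, Prod.mk.injEq]
    refine ⟨trivial, trivial, by ring⟩

lemma foldB_phase2 (w : List Char) : ∀ (l b cur : Int), l ≠ -1 → 0 ≤ b →
    w.foldl bStep (l, b, cur) = (l, max b (Pm cur w), carryC cur w) := by
  induction w with
  | nil =>
    intro l b cur _ hb
    simp [Pm, carryC, max_eq_left hb]
  | cons c r ih =>
    intro l b cur hl hb
    rw [List.foldl_cons, bStep_contains]
    by_cases hc : vw c = true
    · rw [if_pos hc]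
      rw [ih l b (cur + 1) hl hb]
      simp [Pm, carryC, hc]
    · rw [if_neg (by simp [hc]), if_neg (by simpa using hl)]
      rw [ih l (max b cur) 0 hl (le_trans hb (le_max_left _ _))]
      have hc' : vw c = false := by simpa using hc
      simp [Pm, carryC, hc', max_assoc]

-- ---- A's dp build ----

lemma buildA_aux (cs : List Char) : ∀ (k : Nat), k + 1 ≤ cs.length →
    (PySem.List.pyRange 1 ((k + 1 : Nat) : Int) 1).foldl (aDpStep cs)
      ((List.replicate cs.length (0:Int)).set 0
        (if pvVowelsA.contains (cs.getD 0 ' ') then 1 else 0))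
    = dpC 0 (cs.take (k + 1)) ++ List.replicate (cs.length - (k + 1)) 0 := by
  intro k
  induction k with
  | zero =>
    intro hk
    rw [PySem.List.pyRange_one_eq_nil (by norm_num)]
    rcases cs with _ | ⟨c, cs'⟩
    · simp at hk
    · simp [pvVowelsA_eq, dpC, vw, List.replicate_succ, List.take_add_one]
  | succ j ih =>
    intro hk
    have h1 : ((j + 1 + 1 : Nat) : Int) = ((j + 1 : Nat) : Int) + 1 := by push_cast; ring
    rw [h1, PySem.List.pyRange_one_succ_right (by omega), List.foldl_append,
      ih (by omega)]
    simp only [List.foldl_cons, List.foldl_nil]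
    have hjlt : j + 1 < cs.length := by omega
    -- unfold the step
    rw [aDpStep]
    have htn : ((j + 1 : Nat) : Int).toNat = j + 1 := by omega
    rw [htn]
    have hlen : (dpC 0 (cs.take (j + 1))).length = j + 1 := by
      rw [length_dpC, List.length_take]; omega
    have hget : (dpC 0 (cs.take (j + 1)) ++ List.replicate (cs.length - (j + 1)) (0:Int)).getD (j + 1 - 1) 0
        = carryC 0 (cs.take (j + 1)) := by
      rw [List.getD_append _ _ _ (j + 1 - 1) (by rw [hlen]; omega)]
      have hne : cs.take (j + 1) ≠ [] := by
        have hcs0 : cs ≠ [] := by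
          intro h0; rw [h0] at hjlt; simp at hjlt
        simp [List.take_eq_nil_iff, hcs0]
      have := getD_dpC_last (cs.take (j + 1)) hne 0
      rw [← this]
      congr 1
      rw [List.length_take]; omega
    have hcsget : cs.getD (j + 1) ' ' = cs[j + 1] := by
      rw [List.getD_eq_getElem?_getD, List.getElem?_eq_getElem hjlt]; rfl
    rw [hget, hcsget, pvVowelsA_eq]
    have hset : ∀ v : Int,
        (dpC 0 (cs.take (j + 1)) ++ List.replicate (cs.length - (j + 1)) (0:Int)).set (j + 1) v
        = dpC 0 (cs.take (j + 1)) ++ v :: List.replicate (cs.length - (j + 1 + 1)) 0 := by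
      intro v
      have h2 : cs.length - (j + 1) = (cs.length - (j + 1 + 1)) + 1 := by omega
      rw [List.set_append, if_neg (by simp [hlen]), hlen, Nat.sub_self, h2,
        List.replicate_succ, List.set_cons_zero]
    have htake : cs.take (j + 1 + 1) = cs.take (j + 1) ++ [cs[j + 1]] := by
      rw [List.take_add_one, List.getElem?_eq_getElem hjlt]; rfl
    rw [hset, htake, dpC_append]
    have hdpc1 : dpC (carryC 0 (cs.take (j + 1))) [cs[j + 1]]
        = [if (("aeiou".toList).contains cs[j+1]) = false then (0:Int)
           else carryC 0 (cs.take (j + 1)) + 1] := by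
      cases hb : ("aeiou".toList).contains cs[j + 1] with
      | false => simp only [dpC, vw, hb]; norm_num
      | true => simp only [dpC, vw, hb]; norm_num
    rw [hdpc1]
    simp [List.append_assoc]

lemma buildA (cs : List Char) (h : cs ≠ []) :
    (PySem.List.pyRange 1 (cs.length : Int) 1).foldl (aDpStep cs)
      ((List.replicate cs.length (0:Int)).set 0
        (if pvVowelsA.contains (cs.getD 0 ' ') then 1 else 0))
    = dpC 0 cs := by
  have hlen : 1 ≤ cs.length := by
    rcases cs with _ | _
    · exact absurd rfl h
    · simp
  have h1 : cs.length = (cs.length - 1) + 1 := by omega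
  calc (PySem.List.pyRange 1 (cs.length : Int) 1).foldl (aDpStep cs) _
      = (PySem.List.pyRange 1 (((cs.length - 1) + 1 : Nat) : Int) 1).foldl (aDpStep cs) _ := by
        rw [← h1]
    _ = dpC 0 (cs.take ((cs.length - 1) + 1)) ++ List.replicate (cs.length - ((cs.length - 1) + 1)) 0 :=
        buildA_aux cs (cs.length - 1) (by omega)
    _ = dpC 0 cs := by
        rw [← h1, List.take_length]
        simp

-- ---- head of dpC of a consonant-headed/ -tailed block is ≤ 0 ----

lemma headD_dpC_chop (w : List Char) : ((dpC 0 (chop w)).reverse).headD 0 ≤ 0 := by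
  have h1 : ((dpC 0 (chop w)).reverse).headD 0 = (dpC 0 (chop w)).getLastD 0 := by
    rw [List.headD_eq_head?_getD, List.head?_reverse, List.getLastD_eq_getLast?]
  rw [h1]
  rcases hc : chop w with _ | ⟨y, ys⟩
  · simp [dpC]
  · rw [← hc, getLastD_dpC _ (by simp [hc]), carryC_chop]

-- ---- the main equivalence ----

lemma main_eq (s : String) (h : s.toList ≠ []) :
    longest_vowel_string s = longest_vowel_string_alt s := by
  set cs := s.toList with hcs
  set V := cs.takeWhile vw with hV
  set R := cs.dropWhile vw with hR
  have hsplit : cs = V ++ R := (List.takeWhile_append_dropWhile).symm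
  have hVv : ∀ c ∈ V, vw c = true := fun c hc => List.mem_takeWhile_imp hc
  -- A's dp equals dpC 0 cs
  have hdp : (PySem.List.pyRange 1 (cs.length : Int) 1).foldl (aDpStep cs)
      ((List.replicate cs.length (0:Int)).set 0
        (if pvVowelsA.contains (cs.getD 0 ' ') then 1 else 0)) = dpC 0 cs := buildA cs h
  rcases hRd : R with _ | ⟨d, r⟩
  · -- the whole string is vowels
    have hv : ∀ c ∈ cs, vw c = true := by
      intro c hc
      apply hVv
      rw [hsplit, hRd] at hc; simpa using hc
    have hdpv : dpC 0 cs = rampF 0 cs.length := dpC_vowels cs hv 0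
    have hA : longest_vowel_string s = (cs.length : Int) := by
      simp only [longest_vowel_string]
      rw [← hcs, hdp, hdpv]
      rw [show rampF 0 cs.length = rampF 0 cs.length ++ ([] : List Int) by simp]
      rw [dqPopLeft_ramp cs.length 0 le_rfl [] (by simp)]
      simp [dqPopRight, PySem.List.max?]
    have hB : longest_vowel_string_alt s = (cs.length : Int) := by
      simp only [longest_vowel_string_alt]
      rw [← hcs, foldB_vowels cs hv 0 0]
      simp
    rw [hA, hB]
  · -- there is a consonant
    have hd : vw d = false := by
      have := List.head_dropWhile_not vw (l := cs) (by rw [← hR, hRd]; simp)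
      simpa [← hR, hRd] using this
    have hdpc : dpC 0 cs = rampF 0 V.length ++ dpC 0 R := by
      rw [hsplit, dpC_append, dpC_vowels V hVv, carryC_vowels V hVv, hRd]
      simp [dpC, hd]
    -- decompose R into chop R and the trailing vowel run
    have hRdec : dpC 0 R = dpC 0 (chop R) ++ rampF 0 (R.reverse.takeWhile vw).length := by
      conv_lhs => rw [tails_decomp R]
      rw [dpC_append, carryC_chop, dpC_vowels _ (tails_vowels R)]
      simp
    have hchopR : chop R = d :: chop r := by
      rw [hRd, show d :: r = [] ++ d :: r by simp, chop_append_cons [] d r hd]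
      simp
    have hheadR : (dpC 0 R).headD 0 ≤ 0 := by
      rw [hRd]
      simp [dpC, hd]
    have hA : longest_vowel_string s
        = (V.length : Int) + max0 (dpC 0 (chop R)) + (R.reverse.takeWhile vw).length := by
      simp only [longest_vowel_string]
      rw [← hcs, hdp, hdpc]
      rw [dqPopLeft_ramp V.length 0 le_rfl (dpC 0 R) hheadR]
      simp only
      rw [hRdec, List.reverse_append]
      rw [dqPopRight_ramp _ 0 le_rfl _ (headD_dpC_chop R)]
      simp only [List.reverse_reverse]
      rw [count_eq _ (dpC_nonneg (chop R) 0 le_rfl)]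
      rw [max_eq_right (Int.natCast_nonneg ((R.reverse.takeWhile vw).length))]
      ring
    have hB : longest_vowel_string_alt s
        = (V.length : Int) + max0 (dpC 0 (chop R)) + (R.reverse.takeWhile vw).length := by
      simp only [longest_vowel_string_alt]
      rw [← hcs, hsplit, hRd, List.foldl_append, foldB_vowels V hVv 0 0,
        List.foldl_cons, bStep_contains, if_pos rfl]
      simp only [if_neg (by simp [hd] : ¬ vw d = true)]
      rw [foldB_phase2 r (0 + (V.length : Int)) 0 0 (by omega) le_rfl]
      have hk : (0 : Int) + (V.length : Int) ≠ -1 := by omega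
      simp only [if_neg hk]
      rw [max_eq_right (Pm_nonneg r 0 le_rfl), Pm_eq r]
      have hchopR' : chop (d :: r) = d :: chop r := by
        simpa using chop_append_cons [] d r hd
      have h1 : max0 (dpC 0 (chop (d :: r))) = max0 (dpC 0 (chop r)) := by
        rw [hchopR']
        simp [dpC, hd, max0_cons_zero]
      have h2 : carryC 0 r = (((d :: r).reverse.takeWhile vw).length : Int) := by
        have := carryC_tail_len (d :: r)
        simpa [carryC, hd] using this
      rw [h1, h2]
      ring
    rw [hA, hB]

-- ===== VERDICT (by name: the statement is the Claim_ definition above) =====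
theorem longest_vowel_string_spec : Claim_equal_longest_vowel_string := by
  intro s _ hpre
  unfold Spec_longest_vowel_string
  apply main_eq
  intro hnil
  exact hpre (String.toList_eq_nil_iff.mp hnil)

@[simp]
theorem longest_vowel_string_raises : Claim_raises_longest_vowel_string := by
  unfold Claim_raises_longest_vowel_string
  exact ⟨fun s _ h hp => hp h, by decide⟩
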